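-- pv_equiv track=rewrite | github.com/khive-ai/khive.d | src/khive/services/plan_v2/analysis.py | _has_dependencies
-- ===== SOURCE A (Python) =====
-- def _has_dependencies(task_lower: str) -> bool:
--     """Check if task has dependencies."""
--     dependency_indicators = [
--         "depends on",
--         "requires",
--         "needs",
--         "based on",
--         "after",
--         "before",
--         "following",
--         "prerequisite",
--         "conditional",
--         "if",
--         "when",
--     ]
--     return any(indicator in task_lower for indicator in dependency_indicators)
-- ===== SOURCE B (Python) =====
-- _DEP_KEYWORDS = (
--     "depends on",
--     "requires",
--     "needs",
--     "based on",
--     "after",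
--     "before",
--     "following",
--     "prerequisite",
--     "conditional",
--     "if",
--     "when",
-- )
--
--
-- def _has_dependencies(task_lower: str) -> bool:
--     # Single left-to-right scan: at each position test whether any keyword
--     # starts there, instead of one full substring search per keyword.
--     for i in range(len(task_lower)):
--         for kw in _DEP_KEYWORDS:
--             if task_lower.startswith(kw, i):
--                 return True
--     return False
-- ===== Notes on version B (the rewrite author's own statement) =====
-- stated objective: alternative
-- what changed: Replaces A's one-full-substring-search-per-keyword (any(kw in s)) with a single left-to-right scan over the text that tests at each position whether any keyword starts there.
import Mathlib
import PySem

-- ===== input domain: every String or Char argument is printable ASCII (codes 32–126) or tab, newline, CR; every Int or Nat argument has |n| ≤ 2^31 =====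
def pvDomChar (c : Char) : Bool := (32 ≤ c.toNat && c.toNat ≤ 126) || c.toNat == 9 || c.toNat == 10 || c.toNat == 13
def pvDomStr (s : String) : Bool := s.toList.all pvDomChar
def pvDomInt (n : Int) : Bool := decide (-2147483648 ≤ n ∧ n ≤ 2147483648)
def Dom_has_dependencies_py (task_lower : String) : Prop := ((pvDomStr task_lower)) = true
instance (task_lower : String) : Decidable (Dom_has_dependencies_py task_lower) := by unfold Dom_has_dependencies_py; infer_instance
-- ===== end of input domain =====

-- B replaces A's per-keyword full substring searches with a single left-to-right
-- scan of the text testing at each position whether any keyword starts there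
-- (alternative decomposition, same asymptotic cost).


-- ===== PORT A =====
def depIndicators : List String :=
  ["depends on", "requires", "needs", "based on", "after", "before",
   "following", "prerequisite", "conditional", "if", "when"]

def has_dependencies_py (task_lower : String) : Bool :=
  depIndicators.any (fun indicator => PySem.Str.isIn indicator task_lower)

-- ===== PORT B =====
def depKeywords : List (List Char) :=
  ["depends on".toList, "requires".toList, "needs".toList, "based on".toList,
   "after".toList, "before".toList, "following".toList, "prerequisite".toList,
   "conditional".toList, "if".toList, "when".toList]

-- one pass over the text: at each position, does some keyword start here?
def depScan : List Char → Bool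
  | [] => false
  | c :: rest =>
    if depKeywords.any (fun kw => kw.isPrefixOf (c :: rest)) then true
    else depScan rest

def has_dependencies_py_alt (task_lower : String) : Bool :=
  depScan task_lower.toList

-- ===== PRECONDITION & SPEC =====
def Spec_has_dependencies_py (task_lower : String) (out : Bool) : Prop := out = has_dependencies_py_alt task_lower
instance (task_lower : String) (out : Bool) : Decidable (Spec_has_dependencies_py task_lower out) := by unfold Spec_has_dependencies_py; infer_instance

-- ===== CLAIM (what is proved, stated in full; the proofs are below) =====
def Claim_equal_has_dependencies_py : Prop := ∀ (task_lower : String), Dom_has_dependencies_py task_lower → Spec_has_dependencies_py task_lower (has_dependencies_py task_lower)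

-- ===== LEMMAS AND PROOFS =====

lemma depKeywords_ne_nil : ∀ kw ∈ depKeywords, kw ≠ [] := by decide

lemma depScan_iff_infix (cs : List Char) :
    depScan cs = true ↔ ∃ kw ∈ depKeywords, kw <:+: cs := by
  induction cs with
  | nil =>
    simp only [depScan, List.infix_nil]
    constructor
    · intro h; exact absurd h Bool.false_ne_true
    · rintro ⟨kw, hmem, hnil⟩; exact absurd hnil (depKeywords_ne_nil kw hmem)
  | cons c rest ih =>
    simp only [depScan]
    have hb : (depKeywords.any fun kw => kw.isPrefixOf (c :: rest)) = true ↔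
        ∃ kw ∈ depKeywords, kw <+: c :: rest := by
      simp [List.any_eq_true, List.isPrefixOf_iff_prefix]
    by_cases h : (depKeywords.any fun kw => kw.isPrefixOf (c :: rest)) = true
    · rw [if_pos h]
      obtain ⟨kw, hmem, hpre⟩ := hb.mp h
      exact ⟨fun _ => ⟨kw, hmem, hpre.isInfix⟩, fun _ => rfl⟩
    · rw [if_neg h, ih]
      constructor
      · rintro ⟨kw, hmem, hinf⟩
        exact ⟨kw, hmem, List.infix_cons_iff.mpr (Or.inr hinf)⟩
      · rintro ⟨kw, hmem, hinf⟩
        rcases List.infix_cons_iff.mp hinf with hpre | hinf'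
        · exact absurd (hb.mpr ⟨kw, hmem, hpre⟩) h
        · exact ⟨kw, hmem, hinf'⟩

lemma depKeywords_eq_map : depKeywords = depIndicators.map String.toList := by decide

-- ===== VERDICT (by name: the statement is the Claim_ definition above) =====
theorem has_dependencies_py_spec : Claim_equal_has_dependencies_py := by
  intro s _
  unfold Spec_has_dependencies_py has_dependencies_py has_dependencies_py_alt
  rw [Bool.eq_iff_iff, depScan_iff_infix, depKeywords_eq_map, List.any_eq_true]
  constructor
  · rintro ⟨ind, hmem, hIn⟩
    exact ⟨ind.toList, List.mem_map_of_mem hmem, (PySem.Str.isIn_iff_infix _ _).mp hIn⟩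
  · rintro ⟨kw, hkw, hinf⟩
    obtain ⟨ind, hmem, rfl⟩ := List.mem_map.mp hkw
    exact ⟨ind, hmem, (PySem.Str.isIn_iff_infix _ _).mpr hinf⟩
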